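-- pv_equiv track=rewrite | github.com/Taiowaz/GeoSTHN | src/structure_enhence/metapath.py | find_paths_from_root
-- ===== SOURCE A (Python) =====
-- from collections import defaultdict
--
-- def find_paths_from_root(
--     root_node: int,
--     meta_path_def: list,
--     adj_list: defaultdict,
--     node_type_map: dict
-- ) -> list:
--     valid_paths = []
--
--     def _dfs_search(current_path: list):
--         current_node = current_path[-1]
--         current_depth = len(current_path) - 1
--
--         if node_type_map.get(current_node, -1) != meta_path_def[current_depth]:
--             return
--
--         # 如果路径已经达到期望长度，说明找到了一条完整路径
--         if len(current_path) == len(meta_path_def):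
--             valid_paths.append(list(current_path))
--             return
--
--         # 探索下一步 (与之前逻辑相同)
--         next_expected_node_type = meta_path_def[current_depth + 1]
--         for neighbor, _, _ in adj_list.get(current_node, []):
--             if node_type_map.get(neighbor, -1) == next_expected_node_type and neighbor not in current_path:
--                 current_path.append(neighbor)
--                 _dfs_search(current_path)
--                 current_path.pop()
--
--     if node_type_map.get(root_node, -1) == meta_path_def[0]:
--         _dfs_search([root_node])
--
--     return valid_paths
-- ===== SOURCE B (Python) =====
-- def find_paths_from_root(root_node, meta_path_def, adj_list, node_type_map):
--     # Level-synchronous expansion: rebuild the whole frontier of partial paths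
--     # level by level; all valid paths share the metapath's length, so in-order
--     # expansion yields exactly the DFS (lexicographic) output order.
--     if node_type_map.get(root_node, -1) != meta_path_def[0]:
--         return []
--     frontier = [[root_node]]
--     for want in meta_path_def[1:]:
--         frontier = [path + [nb]
--                     for path in frontier
--                     for nb, _, _ in adj_list.get(path[-1], [])
--                     if node_type_map.get(nb, -1) == want and nb not in path]
--     return frontier
-- ===== Notes on version B (the rewrite author's own statement) =====
-- stated objective: alternative
-- what changed: The recursive closure-based DFS with a shared mutable path (append/pop backtracking) is replaced by level-synchronous frontier expansion: one fold over the metapath levels that rebuilds the whole list of partial paths per level with a comprehension; since all valid paths have the metapath's length, in-order expansion yields the identical output order.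
import Mathlib
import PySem

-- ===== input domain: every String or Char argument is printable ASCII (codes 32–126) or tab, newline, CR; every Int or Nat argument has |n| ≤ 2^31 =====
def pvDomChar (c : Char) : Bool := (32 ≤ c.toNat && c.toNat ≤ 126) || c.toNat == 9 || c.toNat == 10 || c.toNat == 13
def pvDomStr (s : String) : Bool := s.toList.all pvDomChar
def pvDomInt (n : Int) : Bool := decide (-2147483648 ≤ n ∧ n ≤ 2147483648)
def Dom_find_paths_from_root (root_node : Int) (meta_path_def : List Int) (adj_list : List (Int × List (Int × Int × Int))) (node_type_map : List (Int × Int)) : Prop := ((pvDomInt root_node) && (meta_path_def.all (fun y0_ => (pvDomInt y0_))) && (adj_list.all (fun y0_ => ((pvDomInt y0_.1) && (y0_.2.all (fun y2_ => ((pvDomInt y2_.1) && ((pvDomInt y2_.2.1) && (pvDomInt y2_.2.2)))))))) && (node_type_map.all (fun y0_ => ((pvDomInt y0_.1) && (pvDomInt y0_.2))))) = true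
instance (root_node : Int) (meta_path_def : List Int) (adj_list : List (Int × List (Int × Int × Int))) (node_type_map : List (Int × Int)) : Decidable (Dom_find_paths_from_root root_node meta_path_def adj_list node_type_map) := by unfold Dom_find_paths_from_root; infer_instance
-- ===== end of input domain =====

-- ===== PORT A =====
-- B replaces the recursive mutable-path DFS by level-synchronous frontier expansion over the metapath (same results, same order).
-- dict.get(k, d): first-match lookup in the association list (Python dicts have unique keys).
def pvLookup {a : Type} (m : List (Int × a)) (k : Int) (d : a) : a :=
  match m with
  | [] => d
  | (k', v) :: t => if k' = k then v else pvLookup t k d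

-- _dfs_search: fuel counts remaining admissible depth; on every reachable call depth < mp.length,
-- so 'mp.getD depth 0' equals Python's meta_path_def[depth] (the getD default is a totality guard only).
def pvDfsA (mp : List Int) (adj : List (Int × List (Int × Int × Int))) (ntm : List (Int × Int)) : Nat → List Int → List (List Int)
  | 0, _ => []
  | fuel + 1, path =>
    let current := PySem.List.pyGetD path (-1) 0       -- current_path[-1]
    let depth := path.length - 1
    if pvLookup ntm current (-1) ≠ mp.getD depth 0 then []
    else if path.length = mp.length then [path]
    else
      let nxt := mp.getD (depth + 1) 0
      (pvLookup adj current []).foldl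
        (fun acc nb =>
          if pvLookup ntm nb.1 (-1) = nxt ∧ nb.1 ∉ path then
            acc ++ pvDfsA mp adj ntm fuel (path ++ [nb.1])
          else acc) []

def find_paths_from_root (root_node : Int) (meta_path_def : List Int) (adj_list : List (Int × List (Int × Int × Int))) (node_type_map : List (Int × Int)) : List (List Int) :=
  if pvLookup node_type_map root_node (-1) = meta_path_def.getD 0 0 then
    pvDfsA meta_path_def adj_list node_type_map meta_path_def.length [root_node]
  else []

-- ===== PORT B =====
-- one frontier step: the list comprehension for a single 'want' level
def pvStepB (adj : List (Int × List (Int × Int × Int))) (ntm : List (Int × Int))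
    (frontier : List (List Int)) (want : Int) : List (List Int) :=
  frontier.flatMap (fun path =>
    (pvLookup adj (PySem.List.pyGetD path (-1) 0) []).filterMap (fun nb =>
      if pvLookup ntm nb.1 (-1) = want ∧ nb.1 ∉ path then some (path ++ [nb.1]) else none))

def find_paths_from_root_alt (root_node : Int) (meta_path_def : List Int) (adj_list : List (Int × List (Int × Int × Int))) (node_type_map : List (Int × Int)) : List (List Int) :=
  if pvLookup node_type_map root_node (-1) ≠ meta_path_def.getD 0 0 then []
  else (meta_path_def.drop 1).foldl (pvStepB adj_list node_type_map) [[root_node]]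

-- ===== PRECONDITION & SPEC =====
-- Pre_ excludes exactly the inputs on which Python A raises: meta_path_def = [] (IndexError on meta_path_def[0]).
def Pre_find_paths_from_root (root_node : Int) (meta_path_def : List Int) (adj_list : List (Int × List (Int × Int × Int))) (node_type_map : List (Int × Int)) : Prop :=
  meta_path_def ≠ []
instance (root_node : Int) (meta_path_def : List Int) (adj_list : List (Int × List (Int × Int × Int))) (node_type_map : List (Int × Int)) : Decidable (Pre_find_paths_from_root root_node meta_path_def adj_list node_type_map) := by unfold Pre_find_paths_from_root; infer_instance
def pvWitness_find_paths_from_root : Int × List Int × (List (Int × List (Int × Int × Int))) × (List (Int × Int)) :=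
  (1, [0, 1], [(1, [(2, 0, 0)])], [(1, 0), (2, 1)])

def Spec_find_paths_from_root (root_node : Int) (meta_path_def : List Int) (adj_list : List (Int × List (Int × Int × Int))) (node_type_map : List (Int × Int)) (out : List (List Int)) : Prop := out = find_paths_from_root_alt root_node meta_path_def adj_list node_type_map
instance (root_node : Int) (meta_path_def : List Int) (adj_list : List (Int × List (Int × Int × Int))) (node_type_map : List (Int × Int)) (out : List (List Int)) : Decidable (Spec_find_paths_from_root root_node meta_path_def adj_list node_type_map out) := by unfold Spec_find_paths_from_root; infer_instance

-- ===== CLAIM (what is proved, stated in full; the proofs are below) =====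
def Claim_equal_find_paths_from_root : Prop := ∀ (root_node : Int) (meta_path_def : List Int) (adj_list : List (Int × List (Int × Int × Int))) (node_type_map : List (Int × Int)), Dom_find_paths_from_root root_node meta_path_def adj_list node_type_map → Pre_find_paths_from_root root_node meta_path_def adj_list node_type_map → Spec_find_paths_from_root root_node meta_path_def adj_list node_type_map (find_paths_from_root root_node meta_path_def adj_list node_type_map)

-- ===== LEMMAS AND PROOFS =====

-- the DFS value of one partial path, with its exact remaining-depth fuel
def pvG (mp : List Int) (adj : List (Int × List (Int × Int × Int))) (ntm : List (Int × Int)) (p : List Int) : List (List Int) :=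
  pvDfsA mp adj ntm (mp.length + 1 - p.length) p

-- frontier invariant: nonempty, within depth, last node type-checked
def pvInv (mp : List Int) (ntm : List (Int × Int)) (p : List Int) : Prop :=
  1 ≤ p.length ∧ p.length ≤ mp.length ∧
    pvLookup ntm (PySem.List.pyGetD p (-1) 0) (-1) = mp.getD (p.length - 1) 0

theorem pvDfsA_succ (mp : List Int) (adj : List (Int × List (Int × Int × Int))) (ntm : List (Int × Int)) (fuel : Nat) (path : List Int) :
    pvDfsA mp adj ntm (fuel + 1) path =
      (if pvLookup ntm (PySem.List.pyGetD path (-1) 0) (-1) ≠ mp.getD (path.length - 1) 0 then []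
       else if path.length = mp.length then [path]
       else
         (pvLookup adj (PySem.List.pyGetD path (-1) 0) []).foldl
           (fun acc nb =>
             if pvLookup ntm nb.1 (-1) = mp.getD (path.length - 1 + 1) 0 ∧ nb.1 ∉ path then
               acc ++ pvDfsA mp adj ntm fuel (path ++ [nb.1])
             else acc) []) := rfl

theorem pvG_terminal (mp : List Int) (adj : List (Int × List (Int × Int × Int))) (ntm : List (Int × Int))
    (p : List Int) (hinv : pvInv mp ntm p) (hL : p.length = mp.length) :
    pvG mp adj ntm p = [p] := by
  obtain ⟨h1, h2, h3⟩ := hinv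
  have hf : mp.length + 1 - p.length = 0 + 1 := by omega
  rw [pvG, hf, pvDfsA_succ]
  rw [if_neg (by simp [h3]), if_pos hL]

theorem pvG_step (mp : List Int) (adj : List (Int × List (Int × Int × Int))) (ntm : List (Int × Int))
    (p : List Int) (hinv : pvInv mp ntm p) (hL : p.length < mp.length) :
    pvG mp adj ntm p
      = (((pvLookup adj (PySem.List.pyGetD p (-1) 0) []).filterMap
           (fun nb => if pvLookup ntm nb.1 (-1) = mp.getD p.length 0 ∧ nb.1 ∉ p
                      then some (p ++ [nb.1]) else none)).map (pvG mp adj ntm)).flatten := by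
  obtain ⟨h1, h2, h3⟩ := hinv
  have hf : mp.length + 1 - p.length = (mp.length - p.length - 1) + 1 + 1 := by omega
  rw [pvG, hf, pvDfsA_succ]
  rw [if_neg (by simp [h3]), if_neg (by omega)]
  have hd1 : p.length - 1 + 1 = p.length := by omega
  rw [hd1]
  -- turn the conditional-extend fold into a flatMap
  have hcongr := PySem.List.foldl_congr_mem
    (l := pvLookup adj (PySem.List.pyGetD p (-1) 0) []) (init := ([] : List (List Int)))
    (f := fun acc nb =>
      if pvLookup ntm nb.1 (-1) = mp.getD p.length 0 ∧ nb.1 ∉ p then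
        acc ++ pvDfsA mp adj ntm (mp.length - p.length - 1 + 1) (p ++ [nb.1])
      else acc)
    (g := fun acc nb => acc ++
      (if pvLookup ntm nb.1 (-1) = mp.getD p.length 0 ∧ nb.1 ∉ p then
        pvDfsA mp adj ntm (mp.length - p.length - 1 + 1) (p ++ [nb.1]) else []))
    (by intro acc nb _; dsimp only; split <;> simp)
  rw [hcongr, PySem.List.foldl_append_eq_flatMap, List.nil_append]
  rw [List.flatMap_def]
  induction pvLookup adj (PySem.List.pyGetD p (-1) 0) [] with
  | nil => simp
  | cons nb tl ih =>
    simp only [List.map_cons, List.filterMap_cons]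
    split
    · simp only [List.map_cons, List.flatten_cons]
      rw [ih]
      congr 1
      rw [pvG]
      congr 1
      simp only [List.length_append, List.length_cons, List.length_nil]
      omega
    · simpa using ih

-- each element pushed by one frontier step is one longer and satisfies the invariant
theorem pvStepB_mem (mp : List Int) (adj : List (Int × List (Int × Int × Int))) (ntm : List (Int × Int))
    (F : List (List Int)) (k : Nat) (hk1 : 1 ≤ k) (hk2 : k < mp.length)
    (hF : ∀ p ∈ F, p.length = k ∧ pvInv mp ntm p) :
    ∀ q ∈ pvStepB adj ntm F (mp.getD k 0), q.length = k + 1 ∧ pvInv mp ntm q := by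
  intro q hq
  obtain ⟨p, hp, hq'⟩ := List.mem_flatMap.mp hq
  obtain ⟨hplen, _⟩ := hF p hp
  obtain ⟨nb, _, hcond⟩ := List.mem_filterMap.mp hq'
  by_cases hc : pvLookup ntm nb.1 (-1) = mp.getD k 0 ∧ nb.1 ∉ p
  · rw [if_pos hc] at hcond
    cases hcond
    refine ⟨by simp [hplen], by simp [hplen], by simp [hplen]; omega, ?_⟩
    rw [PySem.List.pyGetD_neg_one_append_singleton]
    simp only [List.length_append, List.length_cons, List.length_nil, hplen]
    have : k + 1 - 1 = k := by omega
    rw [this]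
    simpa using hc.1
  · rw [if_neg hc] at hcond; cases hcond

-- heart of the proof: the level fold from depth k equals gluing pvG over the frontier
theorem pvLevels (mp : List Int) (adj : List (Int × List (Int × Int × Int))) (ntm : List (Int × Int)) :
    ∀ (d k : Nat), k + d = mp.length → 1 ≤ k → ∀ (F : List (List Int)),
      (∀ p ∈ F, p.length = k ∧ pvInv mp ntm p) →
      (mp.drop k).foldl (pvStepB adj ntm) F = (F.map (pvG mp adj ntm)).flatten := by
  intro d
  induction d with
  | zero =>
    intro k hk _ F hF
    rw [List.drop_eq_nil_of_le (by omega), List.foldl_nil]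
    induction F with
    | nil => simp
    | cons p t ih =>
      rw [List.map_cons, List.flatten_cons,
          pvG_terminal mp adj ntm p (hF p (List.mem_cons_self ..)).2 (by have := (hF p (List.mem_cons_self ..)).1; omega),
          ← ih (fun q hq => hF q (List.mem_cons_of_mem _ hq))]
      rfl
  | succ d ih =>
    intro k hk hk1 F hF
    have hklt : k < mp.length := by omega
    rw [List.drop_eq_getElem_cons hklt, List.foldl_cons]
    have hget : mp[k] = mp.getD k 0 := (List.getD_eq_getElem mp 0 hklt).symm
    rw [hget]
    rw [ih (k + 1) (by omega) (by omega) _ (pvStepB_mem mp adj ntm F k hk1 hklt hF)]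
    -- flatten ∘ map pvG commutes with one expansion step
    induction F with
    | nil => simp [pvStepB]
    | cons p t ihF =>
      have hp := hF p (List.mem_cons_self ..)
      simp only [pvStepB, List.flatMap_cons, List.map_append, List.flatten_append,
        List.map_cons, List.flatten_cons]
      rw [pvG_step mp adj ntm p hp.2 (by omega)]
      have := ihF (fun q hq => hF q (List.mem_cons_of_mem _ hq))
      simp only [pvStepB] at this
      rw [this, hp.1]

-- ===== VERDICT (by name: the statement is the Claim_ definition above) =====
theorem find_paths_from_root_spec : Claim_equal_find_paths_from_root := by
  intro root mp adj ntm _ hpre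
  unfold Spec_find_paths_from_root find_paths_from_root find_paths_from_root_alt
  have hL : mp.length ≠ 0 := by
    intro h; exact hpre (List.eq_nil_of_length_eq_zero h)
  by_cases htc : pvLookup ntm root (-1) = mp.getD 0 0
  · rw [if_pos htc, if_neg (by simpa using htc)]
    have hinv : pvInv mp ntm [root] := by
      refine ⟨by simp, by simp; omega, ?_⟩
      simpa [PySem.List.pyGetD] using htc
    rw [pvLevels mp adj ntm (mp.length - 1) 1 (by omega) (by omega) [[root]]
        (by intro q hq
            have hq' : q = [root] := by simpa using hq
            rw [hq']; exact ⟨by simp, hinv⟩)]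
    simp only [List.map_cons, List.map_nil, List.flatten_cons, List.flatten_nil, List.append_nil]
    rw [pvG]
    norm_num
  · rw [if_neg htc, if_pos (by simpa using htc)]
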